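-- pv_equiv track=rewrite | github.com/JulTob/DnD | AtlasNomina/Map_of_Names.py | SyllabicWeightedExtraction
-- ===== SOURCE A (Python) =====
-- from collections import defaultdict, Counter
--
-- def SyllabicWeightedExtraction(names):
-- 	syllable_weights = defaultdict(int)
-- 	for name in names:
-- 		length = len(name)
-- 		for i in range(length):
-- 			for j in range(i+1, length+1):
-- 				syllable = name[i:j].lower()
-- 				syllable_weights[syllable] += 1
-- 	return syllable_weights
-- ===== SOURCE B (Python) =====
-- def SyllabicWeightedExtraction(names):
--     # Count every non-empty substring (lowercased) of every name.
--     # Lowercase each name once, then for each start position grow the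
--     # substring one character at a time -- no per-substring slicing/lowering.
--     syllable_weights = {}
--     for name in names:
--         low = name.lower()
--         n = len(low)
--         for i in range(n):
--             sub = ""
--             for k in range(i, n):
--                 sub += low[k]
--                 syllable_weights[sub] = syllable_weights.get(sub, 0) + 1
--     return syllable_weights
-- ===== Notes on version B (the rewrite author's own statement) =====
-- stated objective: alternative
-- what changed: B lowercases each name once and enumerates substrings by growing them one character at a time from each start position (counting into a plain dict), instead of slicing and lowercasing name[i:j] for every (i,j) pair.
import Mathlib
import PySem

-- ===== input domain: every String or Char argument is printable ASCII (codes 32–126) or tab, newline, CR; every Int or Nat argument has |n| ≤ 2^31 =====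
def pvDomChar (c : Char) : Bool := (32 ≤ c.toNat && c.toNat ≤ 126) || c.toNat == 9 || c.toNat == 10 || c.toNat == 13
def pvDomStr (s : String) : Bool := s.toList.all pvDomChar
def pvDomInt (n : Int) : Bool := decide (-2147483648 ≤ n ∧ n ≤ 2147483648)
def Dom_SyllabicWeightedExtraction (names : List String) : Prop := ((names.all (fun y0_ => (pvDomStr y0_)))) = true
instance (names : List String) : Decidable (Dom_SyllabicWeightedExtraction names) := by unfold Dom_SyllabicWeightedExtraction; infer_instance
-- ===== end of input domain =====

-- B lowercases each name once and grows each substring one character at a time instead of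
-- slicing and lowercasing every (i,j) pair; same counts, same dict insertion order.

-- ===== PORT A =====
-- for name in names: for i in range(len(name)): for j in range(i+1, len(name)+1):
--   syllable_weights[name[i:j].lower()] += 1          (defaultdict(int))
def SyllabicWeightedExtraction (names : List String) : List (String × Int) :=
  (names.foldl (fun d name =>
    let length : Int := PySem.Str.len name
    (PySem.List.pyRange 0 length 1).foldl (fun d i =>
      (PySem.List.pyRange (i + 1) (length + 1) 1).foldl (fun d j =>
        d.modify (PySem.Str.lower (PySem.Str.slice name (some i) (some j))) 0 (· + 1)) d) d)
   (PySem.Dict.empty : PySem.Dict String Int)).items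

-- ===== PORT B =====
-- inner loop of Source B: sub starts empty; for each remaining char c: sub += c; d[sub] = d.get(sub,0)+1
def pvGrow : PySem.Dict String Int → List Char → List Char → PySem.Dict String Int
  | d, _, [] => d
  | d, sub, c :: rest =>
      pvGrow (d.insert (String.ofList (sub ++ [c])) (d.getD (String.ofList (sub ++ [c])) 0 + 1))
        (sub ++ [c]) rest

def SyllabicWeightedExtraction_alt (names : List String) : List (String × Int) :=
  (names.foldl (fun d name =>
    let low := PySem.Chars.lower name.toList     -- name.lower(), once
    (PySem.List.pyRange 0 (low.length : Int) 1).foldl (fun d i =>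
      pvGrow d [] (low.drop i.toNat)) d)         -- for c in low[i:]
   (PySem.Dict.empty : PySem.Dict String Int)).items

-- ===== PRECONDITION & SPEC =====
def Spec_SyllabicWeightedExtraction (names : List String) (out : List (String × Int)) : Prop := out = SyllabicWeightedExtraction_alt names
instance (names : List String) (out : List (String × Int)) : Decidable (Spec_SyllabicWeightedExtraction names out) := by unfold Spec_SyllabicWeightedExtraction; infer_instance

-- ===== CLAIM (what is proved, stated in full; the proofs are below) =====
def Claim_equal_SyllabicWeightedExtraction : Prop := ∀ (names : List String), Dom_SyllabicWeightedExtraction names → Spec_SyllabicWeightedExtraction names (SyllabicWeightedExtraction names)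

-- ===== LEMMAS AND PROOFS =====

-- A's inner j-loop over [a, a + |s|) counting pre ++ (first j-a+1 chars of s) IS pvGrow d pre s.
theorem pvGrow_eq_foldl (s : List Char) : ∀ (d : PySem.Dict String Int) (pre : List Char) (a : Int),
    (PySem.List.pyRange a (a + s.length) 1).foldl
      (fun d j => d.modify (String.ofList (pre ++ s.take (j - a + 1).toNat)) 0 (· + 1)) d
    = pvGrow d pre s := by
  induction s with
  | nil =>
    intro d pre a
    rw [PySem.List.pyRange_one_eq_nil (by simp)]
    rfl
  | cons c t ih =>
    intro d pre a
    rw [PySem.List.pyRange_one_cons (by simp)]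
    simp only [List.foldl_cons]
    have h1 : (a - a + 1).toNat = 1 := by omega
    rw [h1]
    have h2 : a + ((c :: t).length : Int) = (a + 1) + (t.length : Int) := by
      simp; ring
    rw [h2]
    rw [PySem.List.foldl_congr_mem _ _
      (fun d j => d.modify (String.ofList ((pre ++ [c]) ++ t.take (j - (a + 1) + 1).toNat)) 0 (· + 1)) _
      (by
        intro acc j hj
        rw [PySem.List.mem_pyRange_one] at hj
        have h3 : (j - a + 1).toNat = (j - (a + 1) + 1).toNat + 1 := by omega
        rw [h3, List.take_succ_cons]
        simp)]
    rw [ih]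
    rfl

-- per-name: A's nested i,j loops = B's loop of pvGrow over suffixes of the lowered name.
theorem pvName_eq (name : String) (d : PySem.Dict String Int) :
    (PySem.List.pyRange 0 (PySem.Str.len name) 1).foldl (fun d i =>
      (PySem.List.pyRange (i + 1) (PySem.Str.len name + 1) 1).foldl (fun d j =>
        d.modify (PySem.Str.lower (PySem.Str.slice name (some i) (some j))) 0 (· + 1)) d) d
    = (PySem.List.pyRange 0 ((PySem.Chars.lower name.toList).length : Int) 1).foldl (fun d i =>
        pvGrow d [] ((PySem.Chars.lower name.toList).drop i.toNat)) d := by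
  have hlen : ((PySem.Chars.lower name.toList).length : Int) = PySem.Str.len name := by
    simp [PySem.Chars.lower, PySem.Str.len_eq]
  rw [hlen]
  apply PySem.List.foldl_congr_mem
  intro acc i hi
  rw [PySem.List.mem_pyRange_one] at hi
  have hi0 : 0 ≤ i := hi.1
  have hilen : i < (name.toList.length : Int) := by
    simpa [PySem.Str.len_eq] using hi.2
  -- reshape A's j-loop into the pvGrow_eq_foldl form with a := i + 1, s := suffix
  have hsfx : ((PySem.Chars.lower name.toList).drop i.toNat).length
      = name.toList.length - i.toNat := by
    simp [PySem.Chars.lower]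
  have hb : PySem.Str.len name + 1
      = (i + 1) + (((PySem.Chars.lower name.toList).drop i.toNat).length : Int) := by
    rw [hsfx, PySem.Str.len_eq]; omega
  rw [hb]
  rw [PySem.List.foldl_congr_mem _ _
    (fun d j => d.modify
      (String.ofList ([] ++ ((PySem.Chars.lower name.toList).drop i.toNat).take (j - (i + 1) + 1).toNat)) 0 (· + 1)) _
    (by
      intro acc' j hj
      rw [PySem.List.mem_pyRange_one] at hj
      have hj1 : i + 1 ≤ j := hj.1
      -- name[i:j].lower() = first (j-i) chars of the dropped-at-i lowered name
      have hkey : PySem.Str.lower (PySem.Str.slice name (some i) (some j))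
          = String.ofList ([] ++ ((PySem.Chars.lower name.toList).drop i.toNat).take (j - (i + 1) + 1).toNat) := by
        rw [← String.ofList_toList (s := PySem.Str.lower (PySem.Str.slice name (some i) (some j)))]
        rw [PySem.Str.toList_lower, PySem.Str.toList_slice, PySem.Chars.slice_eq_listSlice]
        rw [PySem.List.slice_toNat _ hi0 (by omega)]
        have h5 : (j.toNat - i.toNat) = (j - (i + 1) + 1).toNat := by omega
        simp [PySem.Chars.lower, List.map_take, List.map_drop, h5]
      rw [hkey])]
  exact pvGrow_eq_foldl _ acc [] (i + 1)

-- ===== VERDICT (by name: the statement is the Claim_ definition above) =====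
theorem SyllabicWeightedExtraction_spec : Claim_equal_SyllabicWeightedExtraction := by
  intro names _
  show SyllabicWeightedExtraction names = SyllabicWeightedExtraction_alt names
  unfold SyllabicWeightedExtraction SyllabicWeightedExtraction_alt
  congr 1
  apply PySem.List.foldl_congr_mem
  intro acc name _
  exact pvName_eq name acc
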